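-- pv_equiv track=rewrite | github.com/JobtechSwe/sokannonser-api | sokannonser/repository/querybuilder.py | _find_hits_subelement
-- ===== SOURCE A (Python) =====
-- def _find_hits_subelement(text):
--     istart = []  # stack of indices of opening parentheses
--     bracket_positions = {}
--     for i, c in enumerate(text):
--         if c == '{':
--             istart.append(i)
--
--         if c == '}':
--             try:
--                 bracket_positions[istart.pop()] = i
--             except IndexError:
--                 pass
--     idx = text.find('hits{') + 4
--     r = text[idx + 1:bracket_positions[idx]]
--     return r
-- ===== SOURCE B (Python) =====
-- def _find_hits_subelement(text):
--     # One forward scan with a depth counter from the block start; no stack/dict.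
--     idx = text.find('hits{') + 4
--     if idx >= len(text) or text[idx] != '{':
--         raise KeyError(idx)
--     depth = 0
--     for j in range(idx, len(text)):
--         c = text[j]
--         if c == '{':
--             depth += 1
--         elif c == '}':
--             depth -= 1
--             if depth == 0:
--                 return text[idx + 1:j]
--     raise KeyError(idx)
-- ===== Notes on version B (the rewrite author's own statement) =====
-- stated objective: simpler
-- what changed: A matches every brace pair in the whole text with a stack plus a position dict and then looks up the block start; B does a single forward depth-counter scan from the hits-block start, keeping no stack or dict and touching only the region from the marker on.
import Mathlib
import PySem

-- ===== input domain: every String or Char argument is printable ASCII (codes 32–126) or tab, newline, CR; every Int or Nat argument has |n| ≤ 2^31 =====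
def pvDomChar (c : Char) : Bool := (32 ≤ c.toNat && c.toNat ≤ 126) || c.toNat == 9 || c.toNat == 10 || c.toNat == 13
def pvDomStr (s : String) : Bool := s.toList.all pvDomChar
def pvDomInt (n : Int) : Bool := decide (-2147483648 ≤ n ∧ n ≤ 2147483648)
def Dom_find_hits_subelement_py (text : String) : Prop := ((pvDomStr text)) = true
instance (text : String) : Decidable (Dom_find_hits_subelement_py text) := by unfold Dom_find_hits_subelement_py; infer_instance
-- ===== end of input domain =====

-- B replaces A's whole-text stack+dict bracket matching by a single forward depth-counter
-- scan starting at the 'hits{' block (objective: simpler, O(1) extra space).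

-- ===== PORT A =====
-- loop body of A's 'for i, c in enumerate(text)'; the stack 'istart' is kept head-first
-- (cons = Python append, head = Python pop from the end: the same push/pop discipline)
def pvStepA (st : List Int × PySem.Dict Int Int) (p : Int × Char) : List Int × PySem.Dict Int Int :=
  let istart := if p.2 = '{' then p.1 :: st.1 else st.1
  if p.2 = '}' then
    match istart with
    | [] => ([], st.2)                                  -- istart.pop() IndexError: pass
    | top :: rest => (rest, st.2.insert top p.1)        -- bracket_positions[istart.pop()] = i
  else (istart, st.2)

def find_hits_subelement_py (text : String) : String :=
  let st := (PySem.List.enumerate text.toList 0).foldl pvStepA ([], PySem.Dict.empty)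
  let idx := PySem.Str.find text "hits{" + 4
  match st.2.get? idx with
  | some j => PySem.Str.slice text (some (idx + 1)) (some j)   -- text[idx+1 : bracket_positions[idx]]
  | none => ""                                                  -- Python raises KeyError here (outside Pre_)

-- ===== PORT B =====
-- B's 'for j in range(idx, len(text))' loop: position j, running depth; some j = index of the closing '}'
def pvScanB : List Char → Int → Int → Option Int
  | [], _, _ => none                                            -- loop ends: Python raises KeyError (outside Pre_)
  | c :: xs, j, depth =>
    if c = '{' then pvScanB xs (j + 1) (depth + 1)
    else if c = '}' then
      if depth - 1 = 0 then some j else pvScanB xs (j + 1) (depth - 1)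
    else pvScanB xs (j + 1) depth

def find_hits_subelement_py_alt (text : String) : String :=
  let idx := PySem.Str.find text "hits{" + 4
  -- idx = text.find(...) + 4 ≥ 3, so idx is never negative and idx.toNat is exact
  if PySem.Str.pyGet? text idx = some '{' then
    match pvScanB (text.toList.drop idx.toNat) idx 0 with
    | some j => PySem.Str.slice text (some (idx + 1)) (some j)  -- text[idx+1 : j]
    | none => ""                                                -- Python raises KeyError here (outside Pre_)
  else ""                                                       -- Python raises KeyError here (outside Pre_)

-- ===== PRECONDITION & SPEC =====
-- Pre_ excludes exactly the inputs on which Python A raises KeyError: those where the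
-- character at the computed block-start index is not an opening brace that is closed later.
def Pre_find_hits_subelement_py (text : String) : Prop :=
  (text.toList)[(PySem.Str.find text "hits{" + 4).toNat]? = some '{' ∧
  ∃ n ∈ List.range (text.toList.length + 1), 1 ≤ n ∧
    ((text.toList.drop (PySem.Str.find text "hits{" + 4).toNat).take n).count '}'
      = ((text.toList.drop (PySem.Str.find text "hits{" + 4).toNat).take n).count '{'
instance (text : String) : Decidable (Pre_find_hits_subelement_py text) := by
  unfold Pre_find_hits_subelement_py; infer_instance

def pvWitness_find_hits_subelement_py : String := "hits{a}"

def Spec_find_hits_subelement_py (text : String) (out : String) : Prop := out = find_hits_subelement_py_alt text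
instance (text : String) (out : String) : Decidable (Spec_find_hits_subelement_py text out) := by unfold Spec_find_hits_subelement_py; infer_instance

-- ===== CLAIM (what is proved, stated in full; the proofs are below) =====
def Claim_equal_find_hits_subelement_py : Prop := ∀ (text : String), Dom_find_hits_subelement_py text → Pre_find_hits_subelement_py text → Spec_find_hits_subelement_py text (find_hits_subelement_py text)

-- ===== LEMMAS AND PROOFS =====

-- once idx is matched in the dict and off the stack, the rest of A's fold keeps its entry
lemma pv_preserve (xs : List Char) (idx v : Int) :
    ∀ (b : Int) (st : List Int) (d : PySem.Dict Int Int),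
      idx ∉ st → idx < b → d.get? idx = some v →
      ((PySem.List.enumerate xs b).foldl pvStepA (st, d)).2.get? idx = some v := by
  induction xs with
  | nil => intro b st d _ _ hd; simpa [PySem.List.enumerate_nil] using hd
  | cons c xs ih =>
    intro b st d hst hlt hd
    rw [PySem.List.enumerate_cons, List.foldl_cons]
    by_cases hc : c = '{'
    · have : pvStepA (st, d) (b, c) = (b :: st, d) := by simp [pvStepA, hc]
      rw [this]
      exact ih (b + 1) (b :: st) d
        (by intro hm; rcases List.mem_cons.mp hm with h|h; exacts [by omega, hst h]) (by omega) hd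
    · by_cases hc2 : c = '}'
      · cases st with
        | nil =>
          have : pvStepA (([] : List Int), d) (b, c) = ([], d) := by simp [pvStepA, hc, hc2]
          rw [this]; exact ih (b + 1) [] d (by simp) (by omega) hd
        | cons t rest =>
          have : pvStepA (t :: rest, d) (b, c) = (rest, d.insert t b) := by
            simp [pvStepA, hc, hc2]
          rw [this]
          have hne : idx ≠ t := by intro h; exact hst (h ▸ List.mem_cons_self)
          exact ih (b + 1) rest (d.insert t b)
            (fun h => hst (List.mem_cons_of_mem _ h)) (by omega)
            (by rw [PySem.Dict.get?_insert_of_ne _ _ hne]; exact hd)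
      · have : pvStepA (st, d) (b, c) = (st, d) := by simp [pvStepA, hc, hc2]
        rw [this]; exact ih (b + 1) st d hst (by omega) hd

-- A's fold with '{'-position idx buried at depth top.length+1 on the stack records for idx
-- exactly the position B's depth-counter scan returns
lemma pv_fold_get (xs : List Char) :
    ∀ (b idx : Int) (top rest : List Int) (d : PySem.Dict Int Int),
      idx ∉ top → idx ∉ rest → idx < b → d.get? idx = none →
      ((PySem.List.enumerate xs b).foldl pvStepA (top ++ idx :: rest, d)).2.get? idx
        = pvScanB xs b ((top.length : Int) + 1) := by
  induction xs with
  | nil => intro b idx top rest d _ _ _ hd; simpa [PySem.List.enumerate_nil, pvScanB] using hd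
  | cons c xs ih =>
    intro b idx top rest d htop hrest hlt hd
    rw [PySem.List.enumerate_cons, List.foldl_cons]
    by_cases hc : c = '{'
    · have : pvStepA (top ++ idx :: rest, d) (b, c) = ((b :: top) ++ idx :: rest, d) := by
        simp [pvStepA, hc]
      rw [this, ih (b + 1) idx (b :: top) rest d
        (by intro hm; rcases List.mem_cons.mp hm with h|h; exacts [by omega, htop h]) hrest (by omega) hd]
      simp [pvScanB, hc]
    · by_cases hc2 : c = '}'
      · cases top with
        | nil =>
          have : pvStepA ([] ++ idx :: rest, d) (b, c) = (rest, d.insert idx b) := by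
            simp [pvStepA, hc, hc2]
          rw [this, pv_preserve xs idx b (b + 1) rest (d.insert idx b) hrest (by omega)
            (PySem.Dict.get?_insert_self _ _ _)]
          simp [pvScanB, hc, hc2]
        | cons t top' =>
          have : pvStepA ((t :: top') ++ idx :: rest, d) (b, c)
              = (top' ++ idx :: rest, d.insert t b) := by simp [pvStepA, hc, hc2]
          have hne : idx ≠ t := by intro h; exact htop (h ▸ List.mem_cons_self)
          rw [this, ih (b + 1) idx top' rest (d.insert t b)
            (fun h => htop (List.mem_cons_of_mem _ h)) hrest (by omega)
            (by rw [PySem.Dict.get?_insert_of_ne _ _ hne]; exact hd)]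
          have h1 : ((t :: top').length : Int) + 1 - 1 ≠ 0 := by simp; omega
          simp only [pvScanB, if_neg hc, if_pos hc2, if_neg h1]
          norm_num
      · have : pvStepA (top ++ idx :: rest, d) (b, c) = (top ++ idx :: rest, d) := by
          simp [pvStepA, hc, hc2]
        rw [this, ih (b + 1) idx top rest d htop hrest (by omega) hd]
        simp [pvScanB, hc, hc2]

-- A's fold over the prefix before idx: every stack entry stays below the scanned region
-- and no key ≥ the region start is in the dict
lemma pv_prefix (xs : List Char) :
    ∀ (b : Int) (st : List Int) (d : PySem.Dict Int Int) (idx : Int),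
      (∀ x ∈ st, x < b) → d.get? idx = none → b + xs.length ≤ idx →
      (∀ x ∈ ((PySem.List.enumerate xs b).foldl pvStepA (st, d)).1, x < b + xs.length) ∧
        ((PySem.List.enumerate xs b).foldl pvStepA (st, d)).2.get? idx = none := by
  induction xs with
  | nil =>
    intro b st d idx hst hd _
    simp only [PySem.List.enumerate_nil, List.foldl_nil, List.length_nil]
    exact ⟨fun x hx => by have := hst x hx; push_cast; omega, hd⟩
  | cons c xs ih =>
    intro b st d idx hst hd hle
    rw [PySem.List.enumerate_cons, List.foldl_cons]
    have hlen : (b + 1) + (xs.length : Int) = b + ((c :: xs).length : Int) := by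
      simp only [List.length_cons]; push_cast; ring
    by_cases hc : c = '{'
    · have : pvStepA (st, d) (b, c) = (b :: st, d) := by simp [pvStepA, hc]
      rw [this]
      have h := ih (b + 1) (b :: st) d idx
        (by intro x hx; rcases List.mem_cons.mp hx with h | h; exacts [by omega, by have := hst x h; omega])
        hd (by push_cast at hle ⊢; omega)
      rw [hlen] at h; exact h
    · by_cases hc2 : c = '}'
      · cases st with
        | nil =>
          have : pvStepA (([] : List Int), d) (b, c) = ([], d) := by simp [pvStepA, hc, hc2]
          rw [this]
          have h := ih (b + 1) [] d idx (by simp) hd (by push_cast at hle ⊢; omega)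
          rw [hlen] at h; exact h
        | cons t rest =>
          have : pvStepA (t :: rest, d) (b, c) = (rest, d.insert t b) := by
            simp [pvStepA, hc, hc2]
          rw [this]
          have hne : idx ≠ t := by
            have := hst t List.mem_cons_self; push_cast at hle; omega
          have h := ih (b + 1) rest (d.insert t b) idx
            (by intro x hx; have := hst x (List.mem_cons_of_mem _ hx); omega)
            (by rw [PySem.Dict.get?_insert_of_ne _ _ hne]; exact hd)
            (by push_cast at hle ⊢; omega)
          rw [hlen] at h; exact h
      · have : pvStepA (st, d) (b, c) = (st, d) := by simp [pvStepA, hc, hc2]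
        rw [this]
        have h := ih (b + 1) st d idx
          (by intro x hx; have := hst x hx; omega) hd (by push_cast at hle ⊢; omega)
        rw [hlen] at h; exact h

-- ===== VERDICT (by name: the statement is the Claim_ definition above) =====
theorem find_hits_subelement_py_spec : Claim_equal_find_hits_subelement_py := by
  intro text _ hpre
  obtain ⟨hget, -⟩ := hpre
  unfold Spec_find_hits_subelement_py find_hits_subelement_py find_hits_subelement_py_alt
  set l := text.toList with hl
  set f := PySem.Str.find text "hits{" with hf
  have hfge : -1 ≤ f := by
    rw [hf, PySem.Str.find]; exact PySem.Chars.neg_one_le_find _ _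
  set idx := f + 4 with hidx
  have hidx0 : 0 ≤ idx := by omega
  set k := idx.toNat with hk
  have hkid : (k : Int) = idx := Int.toNat_of_nonneg hidx0
  have hget' : l[k]? = some '{' := hget
  have hklen : k < l.length := (List.getElem?_eq_some_iff.mp hget').1
  have hdrop : l.drop k = '{' :: l.drop (k + 1) := by
    rw [List.drop_eq_getElem_cons hklen, (List.getElem?_eq_some_iff.mp hget').2]
  -- B's side: the guard holds and the scan starts on the '{'
  have hB : PySem.Str.pyGet? text idx = some '{' := by
    rw [← hkid]; simpa [← hl] using (PySem.Str.pyGet?_natCast text k).trans hget'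
  -- A's side: split the fold at position k
  have hsplit : l = l.take k ++ '{' :: l.drop (k + 1) := by
    rw [← hdrop, List.take_append_drop]
  have htlen : (l.take k).length = k := List.length_take_of_le (le_of_lt hklen)
  have hA : ((PySem.List.enumerate l 0).foldl pvStepA ([], PySem.Dict.empty)).2.get? idx
      = pvScanB (l.drop k) idx 0 := by
    conv_lhs => rw [hsplit]
    rw [PySem.List.enumerate_append, List.foldl_append, htlen]
    obtain ⟨hst0, hd0⟩ := pv_prefix (l.take k) 0 [] PySem.Dict.empty idx
      (by simp) (PySem.Dict.get?_empty _) (by rw [htlen]; omega)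
    set s0 := (PySem.List.enumerate (l.take k) 0).foldl pvStepA ([], PySem.Dict.empty) with hs0
    rw [htlen] at hst0
    have hb : (0 : Int) + (k : Int) = idx := by omega
    rw [PySem.List.enumerate_cons, List.foldl_cons, hb]
    have hstep : pvStepA s0 (idx, '{') = (idx :: s0.1, s0.2) := by
      cases s0; simp [pvStepA]
    rw [hstep]
    have := pv_fold_get (l.drop (k + 1)) (idx + 1) idx [] s0.1 s0.2
      (by simp) (fun h => by have := hst0 idx h; omega) (by omega) hd0
    simp only [List.nil_append, List.length_nil] at this
    rw [this, hdrop]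
    simp [pvScanB]
  rw [if_pos hB]
  have hk' : idx.toNat = k := rfl
  simp only [hA, hk']
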